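-- pv_equiv track=rewrite | github.com/SimonWolf/OEEG | src/leistung.py | __make_column_metadata
-- ===== SOURCE A (Python) =====
-- from typing import List, Tuple
--
-- def __make_column_metadata(n_cols: int, wr_label: str) -> List[Tuple[str, int]]:
--     """
--     Baut eine Liste (sensor, string) für jede Spalte nach der Logik:
--         [WR_P] + [WR_S1_P ... WR_Sn_P] + [WR_sum] + [WR_S1_Udc ...] (+ [WR_T] optional)
--     Rückgabe: Liste mit Länge n_cols, Eintrag z.B. ('P', -1) oder ('P', 1) oder ('Udc', 1) ...
--     """
--     if n_cols < 2:
--         raise ValueError(f"{wr_label}: Ungültige Anzahl an Spalten ({n_cols})")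
--
--     n_strings = (n_cols - 2) // 2
--
--     meta: List[Tuple[str, int]] = []
--     meta.append(("P", -1))
--     for i in range(1, n_strings + 1):
--         meta.append(("P", i))
--     meta.append(("sum", -1))
--     for i in range(1, n_strings + 1):
--         meta.append(("Udc", i))
--     if (n_cols - 2) % 2 == 1:
--         meta.append(("T", -1))
--
--     if len(meta) != n_cols:
--         raise RuntimeError("Interner Fehler bei meta-Erstellung")
--
--     return meta
-- ===== SOURCE B (Python) =====
-- from typing import List, Tuple
--
-- def __make_column_metadata(n_cols: int, wr_label: str) -> List[Tuple[str, int]]: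
--     if n_cols < 2:
--         raise ValueError(f"{wr_label}: Ungültige Anzahl an Spalten ({n_cols})")
--     s = (n_cols - 2) // 2
--     out: List[Tuple[str, int]] = []
--     for j in range(n_cols):
--         if j == 0:
--             out.append(("P", -1))
--         elif j <= s:
--             out.append(("P", j))
--         elif j == s + 1:
--             out.append(("sum", -1))
--         elif j <= 2 * s + 1:
--             out.append(("Udc", j - (s + 1)))
--         else:
--             out.append(("T", -1))
--     return out
-- ===== Notes on version B (the rewrite author's own statement) =====
-- stated objective: alternative
-- what changed: Replaces the segmented construction (two separate loops plus appended sentinels and a redundant length check) with a single pass over all column indices that classifies each index into its region by a per-index formula; drops the unreachable RuntimeError check.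
import Mathlib
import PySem

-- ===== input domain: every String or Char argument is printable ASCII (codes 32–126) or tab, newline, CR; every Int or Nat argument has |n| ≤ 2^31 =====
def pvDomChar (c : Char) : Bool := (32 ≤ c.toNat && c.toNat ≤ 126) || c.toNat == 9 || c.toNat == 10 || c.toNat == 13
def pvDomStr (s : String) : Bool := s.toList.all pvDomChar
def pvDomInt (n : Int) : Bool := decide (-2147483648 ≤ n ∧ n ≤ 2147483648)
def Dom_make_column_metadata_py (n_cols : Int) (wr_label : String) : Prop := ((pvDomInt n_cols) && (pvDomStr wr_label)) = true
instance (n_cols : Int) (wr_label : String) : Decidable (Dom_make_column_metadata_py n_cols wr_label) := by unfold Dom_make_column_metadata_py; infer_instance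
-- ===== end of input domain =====

-- B builds the same list in one pass over all column indices, classifying each index
-- into its region by a per-index formula (alternative decomposition, same cost).

-- ===== PORT A =====
-- literal port of A: the two 'raise' sites return [] (excluded by Pre_)
def make_column_metadata_py (n_cols : Int) (wr_label : String) : List (String × Int) :=
  if n_cols < 2 then []
  else
    let n_strings := PySem.Int.floordiv (n_cols - 2) 2
    let m : List (String × Int) := []
    let m := m ++ [("P", -1)]
    let m := (PySem.List.pyRange 1 (n_strings + 1) 1).foldl
      (fun acc i => acc ++ [("P", i)]) m
    let m := m ++ [("sum", -1)]
    let m := (PySem.List.pyRange 1 (n_strings + 1) 1).foldl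
      (fun acc i => acc ++ [("Udc", i)]) m
    let m := if PySem.Int.mod (n_cols - 2) 2 = 1 then m ++ [("T", -1)] else m
    if (m.length : Int) ≠ n_cols then [] else m

-- ===== PORT B =====
def make_column_metadata_py_alt (n_cols : Int) (wr_label : String) : List (String × Int) :=
  if n_cols < 2 then []
  else
    let s := PySem.Int.floordiv (n_cols - 2) 2
    (PySem.List.pyRange 0 n_cols 1).foldl
      (fun out j => out ++
        [if j = 0 then ("P", -1)
         else if j ≤ s then ("P", j)
         else if j = s + 1 then ("sum", -1)
         else if j ≤ 2 * s + 1 then ("Udc", j - (s + 1))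
         else ("T", -1)]) []

-- ===== PRECONDITION & SPEC =====
-- Pre_ excludes n_cols < 2, where A raises ValueError (B raises the same error there).
def Pre_make_column_metadata_py (n_cols : Int) (wr_label : String) : Prop := 2 ≤ n_cols
instance (n_cols : Int) (wr_label : String) : Decidable (Pre_make_column_metadata_py n_cols wr_label) := by unfold Pre_make_column_metadata_py; infer_instance
def pvWitness_make_column_metadata_py : Int × String := (5, "WR1")

def Spec_make_column_metadata_py (n_cols : Int) (wr_label : String) (out : List (String × Int)) : Prop := out = make_column_metadata_py_alt n_cols wr_label
instance (n_cols : Int) (wr_label : String) (out : List (String × Int)) : Decidable (Spec_make_column_metadata_py n_cols wr_label out) := by unfold Spec_make_column_metadata_py; infer_instance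

-- ===== CLAIM (what is proved, stated in full; the proofs are below) =====
def Claim_equal_make_column_metadata_py : Prop := ∀ (n_cols : Int) (wr_label : String), Dom_make_column_metadata_py n_cols wr_label → Pre_make_column_metadata_py n_cols wr_label → Spec_make_column_metadata_py n_cols wr_label (make_column_metadata_py n_cols wr_label)

-- ===== LEMMAS AND PROOFS =====

theorem make_column_metadata_key (n_cols : Int) (wr_label : String) (h : 2 ≤ n_cols) :
    make_column_metadata_py n_cols wr_label = make_column_metadata_py_alt n_cols wr_label := by
  unfold make_column_metadata_py make_column_metadata_py_alt
  have h2 : ¬ n_cols < 2 := by omega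
  simp only [if_neg h2]
  set s := PySem.Int.floordiv (n_cols - 2) 2 with hs
  have hdiv : s = (n_cols - 2) / 2 := by
    rw [hs, PySem.Int.floordiv_eq_ediv_of_pos (by omega)]
  have hmod : PySem.Int.mod (n_cols - 2) 2 = (n_cols - 2) % 2 := by
    rw [PySem.Int.mod_eq_emod_of_pos (by omega)]
  have hs0 : 0 ≤ s := by rw [hdiv]; omega
  have hkey : 2 * s + (n_cols - 2) % 2 = n_cols - 2 := by rw [hdiv]; omega
  have hr : (n_cols - 2) % 2 = 0 ∨ (n_cols - 2) % 2 = 1 := by omega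
  -- rewrite all three folds as maps
  rw [PySem.List.foldl_append_singleton_eq_map, PySem.List.foldl_append_singleton_eq_map,
      PySem.List.foldl_append_singleton_eq_map]
  -- split B's index range into the five regions
  rw [PySem.List.pyRange_one_append 0 1 n_cols (by omega) (by omega),
      PySem.List.pyRange_one_append 1 (s + 1) n_cols (by omega) (by omega),
      PySem.List.pyRange_one_append (s + 1) (s + 2) n_cols (by omega) (by omega),
      PySem.List.pyRange_one_append (s + 2) (2 * s + 2) n_cols (by omega) (by omega)]
  simp only [List.map_append]
  -- region [0,1): the leading ('P', -1)
  have e0 : (PySem.List.pyRange 0 1 1).map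
      (fun j => if j = 0 then (("P", -1) : String × Int)
         else if j ≤ s then ("P", j)
         else if j = s + 1 then ("sum", -1)
         else if j ≤ 2 * s + 1 then ("Udc", j - (s + 1))
         else ("T", -1))
      = [("P", -1)] := by
    have h01 : PySem.List.pyRange 0 1 1 = [0] := by decide
    rw [h01]
    simp only [List.map_cons, List.map_nil]
    simp
  -- region [1, s+1): the per-string 'P' entries
  have e1 : (PySem.List.pyRange 1 (s + 1) 1).map
      (fun j => if j = 0 then (("P", -1) : String × Int)
         else if j ≤ s then ("P", j)
         else if j = s + 1 then ("sum", -1)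
         else if j ≤ 2 * s + 1 then ("Udc", j - (s + 1))
         else ("T", -1))
      = (PySem.List.pyRange 1 (s + 1) 1).map (fun i => ("P", i)) := by
    apply List.map_congr_left
    intro j hj
    rw [PySem.List.mem_pyRange_one] at hj
    rw [if_neg (by omega), if_pos (by omega)]
  -- region [s+1, s+2): the ('sum', -1) entry
  have e2 : (PySem.List.pyRange (s + 1) (s + 2) 1).map
      (fun j => if j = 0 then (("P", -1) : String × Int)
         else if j ≤ s then ("P", j)
         else if j = s + 1 then ("sum", -1)
         else if j ≤ 2 * s + 1 then ("Udc", j - (s + 1))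
         else ("T", -1))
      = [("sum", -1)] := by
    have h12 : PySem.List.pyRange (s + 1) (s + 2) 1 = [s + 1] := by
      rw [show s + 2 = (s + 1) + 1 from by ring]
      exact PySem.List.pyRange_one_singleton (s + 1)
    rw [h12]
    simp only [List.map_cons, List.map_nil]
    have hne : ¬ (s + 1 = 0) := by omega
    simp [hne]
  -- region [s+2, 2s+2): the 'Udc' entries
  have e3 : (PySem.List.pyRange (s + 2) (2 * s + 2) 1).map
      (fun j => if j = 0 then (("P", -1) : String × Int)
         else if j ≤ s then ("P", j)
         else if j = s + 1 then ("sum", -1)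
         else if j ≤ 2 * s + 1 then ("Udc", j - (s + 1))
         else ("T", -1))
      = (PySem.List.pyRange 1 (s + 1) 1).map (fun i => ("Udc", i)) := by
    rw [PySem.List.pyRange_one (s + 2), PySem.List.pyRange_one 1]
    have hlen : (2 * s + 2 - (s + 2)).toNat = (s + 1 - 1).toNat := by omega
    rw [hlen, List.map_map, List.map_map]
    apply List.map_congr_left
    intro k hk
    rw [List.mem_range] at hk
    have hks : (k : Int) < s := by omega
    simp only [Function.comp]
    rw [if_neg (by omega), if_neg (by omega), if_neg (by omega), if_pos (by omega)]
    have : s + 2 + (k : Int) - (s + 1) = 1 + (k : Int) := by ring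
    rw [this]
  -- region [2s+2, n_cols): the optional trailing ('T', -1)
  have e4 : (PySem.List.pyRange (2 * s + 2) n_cols 1).map
      (fun j => if j = 0 then (("P", -1) : String × Int)
         else if j ≤ s then ("P", j)
         else if j = s + 1 then ("sum", -1)
         else if j ≤ 2 * s + 1 then ("Udc", j - (s + 1))
         else ("T", -1))
      = if (n_cols - 2) % 2 = 1 then [("T", -1)] else [] := by
    rcases hr with hr0 | hr1
    · rw [if_neg (by omega), PySem.List.pyRange_one_eq_nil (by omega), List.map_nil]
    · rw [if_pos hr1]
      have : n_cols = 2 * s + 2 + 1 := by omega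
      rw [this, PySem.List.pyRange_one_singleton]
      simp only [List.map_cons, List.map_nil]
      rw [if_neg (by omega), if_neg (by omega), if_neg (by omega), if_neg (by omega)]
  rw [e0, e1, e2, e3, e4, hmod]
  -- discharge A's (unreachable) length check
  have hlenP : (PySem.List.pyRange 1 (s + 1) 1).length = s.toNat := by
    rw [PySem.List.length_pyRange_one]; omega
  rcases hr with hr0 | hr1
  · have hT : ¬ ((n_cols - 2) % 2 = 1) := by omega
    simp only [if_neg hT]
    rw [if_neg (by
      push Not
      simp only [List.length_append, List.length_map, List.length_cons, List.length_nil, hlenP]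
      push_cast; omega)]
    simp
  · simp only [if_pos hr1]
    rw [if_neg (by
      push Not
      simp only [List.length_append, List.length_map, List.length_cons, List.length_nil, hlenP]
      push_cast; omega)]
    simp

-- ===== VERDICT (by name: the statement is the Claim_ definition above) =====
theorem make_column_metadata_py_spec : Claim_equal_make_column_metadata_py := by
  intro n_cols wr_label _ hpre
  exact make_column_metadata_key n_cols wr_label hpre
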